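-- pv_equiv track=rewrite | github.com/xkunD/datascience-cw | template.py | find_most_viral
-- ===== SOURCE A (Python) =====
-- def find_most_viral(contacts_dic):
--     """Return the most viral contacts: those sick people with the largest
--     contact list
--
--     Args:
--         contacts_dic (dic): each entry is a sick person's name and their list
--         of contacts.
--
--     Returns:
--         list: contains the names of sick people who have the largest contact
--         lists
--     """
--     max_len = 0
--     most_viral_list = []
--
--     for patient, contacts_list in contacts_dic.items():
--         if len(contacts_list) > max_len:
--             # found person with larger max contacts
--             max_len = len(contacts_list)
--             most_viral_list = [patient]
--
--         elif len(contacts_list) == max_len: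
--             # found person with same max contacts
--             most_viral_list.append(patient)
--
--     return sorted(most_viral_list)
-- ===== SOURCE B (Python) =====
-- def find_most_viral(contacts_dic):
--     m = max((len(c) for c in contacts_dic.values()), default=0)
--     return sorted(p for p, c in contacts_dic.items() if len(c) == m)
-- ===== Notes on version B (the rewrite author's own statement) =====
-- stated objective: simpler
-- what changed: Replaces A's incremental max-tracking loop with reset-and-append list state by a two-pass form: compute the maximum contact-list length, then filter the patients reaching it.
import Mathlib
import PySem

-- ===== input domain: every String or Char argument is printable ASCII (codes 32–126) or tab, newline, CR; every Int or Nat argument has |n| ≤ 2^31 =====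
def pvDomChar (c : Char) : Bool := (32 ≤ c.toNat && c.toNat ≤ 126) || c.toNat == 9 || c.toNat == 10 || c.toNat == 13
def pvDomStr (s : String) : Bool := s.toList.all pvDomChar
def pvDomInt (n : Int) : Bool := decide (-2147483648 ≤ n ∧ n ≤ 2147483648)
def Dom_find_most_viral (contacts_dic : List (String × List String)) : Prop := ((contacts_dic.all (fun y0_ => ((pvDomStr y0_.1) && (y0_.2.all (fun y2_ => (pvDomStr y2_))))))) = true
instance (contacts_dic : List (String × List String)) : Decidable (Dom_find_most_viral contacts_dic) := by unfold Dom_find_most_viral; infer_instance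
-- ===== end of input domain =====

-- ===== PORT A =====
-- B replaces A's single incremental max-and-collect pass by: find the max length, then filter (simpler).
def find_most_viral (contacts_dic : List (String × List String)) : List String :=
  let st := contacts_dic.foldl (fun (st : Nat × List String) pc =>
    if pc.2.length > st.1 then (pc.2.length, [pc.1])
    else if pc.2.length = st.1 then (st.1, st.2 ++ [pc.1])
    else st) (0, [])
  PySem.List.sorted st.2 (fun x => x) false

-- ===== PORT B =====
def find_most_viral_alt (contacts_dic : List (String × List String)) : List String :=
  let m := contacts_dic.foldl (fun acc pc => max acc pc.2.length) 0
  PySem.List.sorted ((contacts_dic.filter (fun pc => pc.2.length = m)).map Prod.fst) (fun x => x) false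

-- ===== PRECONDITION & SPEC =====
def Spec_find_most_viral (contacts_dic : List (String × List String)) (out : List String) : Prop := out = find_most_viral_alt contacts_dic
instance (contacts_dic : List (String × List String)) (out : List String) : Decidable (Spec_find_most_viral contacts_dic out) := by unfold Spec_find_most_viral; infer_instance

-- ===== CLAIM (what is proved, stated in full; the proofs are below) =====
def Claim_equal_find_most_viral : Prop := ∀ (contacts_dic : List (String × List String)), Dom_find_most_viral contacts_dic → Spec_find_most_viral contacts_dic (find_most_viral contacts_dic)

-- ===== LEMMAS AND PROOFS =====
def fmvF (k : Nat) (l : List (String × List String)) : List String :=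
  (l.filter (fun pc => pc.2.length = k)).map Prod.fst

lemma fmv_hmax (t : List (String × List String)) : ∀ (a : Nat),
    t.foldl (fun acc pc => max acc pc.2.length) a
      = max a (t.foldl (fun acc pc => max acc pc.2.length) 0) := by
  induction t with
  | nil => simp
  | cons q r ihr =>
    intro a
    simp only [List.foldl_cons]
    rw [ihr, ihr (max 0 q.2.length)]
    omega

lemma fmv_loopA (l : List (String × List String)) : ∀ (m : Nat) (acc : List String),
    l.foldl (fun (st : Nat × List String) pc =>
      if pc.2.length > st.1 then (pc.2.length, [pc.1])
      else if pc.2.length = st.1 then (st.1, st.2 ++ [pc.1])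
      else st) (m, acc)
    = (max m (l.foldl (fun acc pc => max acc pc.2.length) 0),
       (if l.foldl (fun acc pc => max acc pc.2.length) 0 ≤ m then acc else [])
         ++ fmvF (max m (l.foldl (fun acc pc => max acc pc.2.length) 0)) l) := by
  induction l with
  | nil => intro m acc; simp [fmvF]
  | cons pc t ih =>
    intro m acc
    simp only [List.foldl_cons]
    simp only [Nat.zero_max]
    simp only [fmv_hmax t pc.2.length]
    set Mt := t.foldl (fun acc pc => max acc pc.2.length) 0 with hMt
    by_cases h1 : pc.2.length > m
    · rw [if_pos h1, ih]
      simp only [fmvF, List.filter_cons]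
      by_cases h2 : Mt ≤ pc.2.length
      · rw [show max pc.2.length Mt = pc.2.length from by omega,
            show max m pc.2.length = pc.2.length from by omega]
        simp [h2, show ¬ pc.2.length ≤ m from by omega]
      · rw [show max pc.2.length Mt = Mt from by omega,
            show max m Mt = Mt from by omega]
        simp [h2, show ¬ Mt ≤ m from by omega, show ¬ pc.2.length = Mt from by omega]
    · rw [if_neg h1]
      by_cases h3 : pc.2.length = m
      · rw [if_pos h3, ih,
            show max m (max pc.2.length Mt) = max m Mt from by omega]
        simp only [fmvF, List.filter_cons]
        by_cases h4 : Mt ≤ m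
        · simp [h4, h3]
        · simp [h4, show ¬ max pc.2.length Mt ≤ m from by omega,
                show max m Mt = Mt from by omega, show ¬ pc.2.length = Mt from by omega]
      · rw [if_neg h3, ih,
            show max m (max pc.2.length Mt) = max m Mt from by omega]
        simp only [fmvF, List.filter_cons]
        by_cases h4 : Mt ≤ m
        · simp [h4, show max pc.2.length Mt ≤ m from by omega, h3]
        · simp [h4, show ¬ max pc.2.length Mt ≤ m from by omega,
                show max m Mt = Mt from by omega, show ¬ pc.2.length = Mt from by omega]

-- ===== VERDICT (by name: the statement is the Claim_ definition above) =====
theorem find_most_viral_spec : Claim_equal_find_most_viral := by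
  intro d _
  unfold Spec_find_most_viral find_most_viral find_most_viral_alt
  rw [fmv_loopA]
  simp [fmvF]
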